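-- pv_equiv track=rewrite | github.com/miliar/Code_Jam_Webscraper | Solutions_python/Problem_201/2026.py | find_empty
-- ===== SOURCE A (Python) =====
-- def find_empty(S):
--     '''returns a list of indexes'''
--     index = 0
--     while True:
--         index = S.find('.', index)
--         if index == -1:
--             return
--         yield index
--         index += 1
-- ===== SOURCE B (Python) =====
-- def find_empty(S):
--     '''returns a list of indexes'''
--     pos = -1
--     for part in S.split('.')[:-1]:
--         pos += len(part) + 1
--         yield pos
-- ===== Notes on version B (the rewrite author's own statement) =====
-- stated objective: alternative
-- what changed: Instead of repeatedly searching with str.find and a -1 sentinel, B splits the string once on the dot separator and reconstructs each dot's index as a running sum of chunk lengths plus separators.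
import Mathlib
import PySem

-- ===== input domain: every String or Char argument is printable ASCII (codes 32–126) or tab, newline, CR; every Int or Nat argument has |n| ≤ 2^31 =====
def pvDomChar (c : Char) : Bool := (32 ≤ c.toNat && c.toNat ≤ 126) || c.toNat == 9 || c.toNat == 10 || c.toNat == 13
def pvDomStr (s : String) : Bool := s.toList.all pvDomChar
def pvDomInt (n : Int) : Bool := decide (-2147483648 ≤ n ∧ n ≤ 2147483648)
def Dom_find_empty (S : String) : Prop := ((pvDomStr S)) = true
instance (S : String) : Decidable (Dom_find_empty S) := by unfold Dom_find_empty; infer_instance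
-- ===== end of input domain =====

-- B replaces A's repeated str.find('.') search by a single S.split('.') and reconstructs
-- each dot's index as a running sum of chunk lengths plus separators (objective: alternative).

-- ===== PORT A =====
-- while True: index = S.find('.', index); if index == -1: return; yield index; index += 1
-- fuel only makes the loop total: the loop runs at most len(S)+1 iterations.
def findEmptyLoopA (cs : List Char) (index : Int) (fuel : Nat) : List Int :=
  match fuel with
  | 0 => []
  | f + 1 =>
    let j := PySem.Chars.findFrom cs ['.'] index
    if j = -1 then [] else j :: findEmptyLoopA cs (j + 1) f

def find_empty (S : String) : List Int :=
  findEmptyLoopA S.toList 0 (S.toList.length + 1)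

-- ===== PORT B =====
-- pos = -1; for part in S.split('.')[:-1]: pos += len(part) + 1; yield pos
def findEmptyLoopB (parts : List (List Char)) (pos : Int) : List Int :=
  match parts with
  | [] => []
  | p :: rest => (pos + p.length + 1) :: findEmptyLoopB rest (pos + p.length + 1)

def find_empty_alt (S : String) : List Int :=
  findEmptyLoopB (PySem.List.slice (PySem.Chars.splitOn S.toList ['.']) none (some (-1))) (-1)

-- ===== PRECONDITION & SPEC =====
def Spec_find_empty (S : String) (out : List Int) : Prop := out = find_empty_alt S
instance (S : String) (out : List Int) : Decidable (Spec_find_empty S out) := by unfold Spec_find_empty; infer_instance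

-- ===== CLAIM (what is proved, stated in full; the proofs are below) =====
def Claim_equal_find_empty : Prop := ∀ (S : String), Dom_find_empty S → Spec_find_empty S (find_empty S)

-- ===== LEMMAS AND PROOFS =====

-- reference function: indices (from i) of '.' in l
def gDots (l : List Char) (i : Int) : List Int :=
  match l with
  | [] => []
  | c :: t => if c = '.' then i :: gDots t (i + 1) else gDots t (i + 1)

-- structural model of splitOn on separator ['.']
def fSplit (l : List Char) (cur : List Char) : List (List Char) :=
  match l with
  | [] => [cur.reverse]
  | c :: rest => if c = '.' then cur.reverse :: fSplit rest [] else fSplit rest (c :: cur)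

theorem fSplit_ne_nil (l cur : List Char) : fSplit l cur ≠ [] := by
  cases l with
  | nil => simp [fSplit]
  | cons c rest => by_cases h : c = '.' <;> simp [fSplit, h] <;> exact fSplit_ne_nil rest (c :: cur)

theorem splitOn_go_eq (l : List Char) (fuel : Nat) (cur : List Char) (acc : List (List Char))
    (hf : l.length ≤ fuel) :
    PySem.Chars.splitOn.go ['.'] fuel l cur acc = acc.reverse ++ fSplit l cur := by
  induction fuel generalizing l cur acc with
  | zero =>
    have : l = [] := by cases l <;> simp_all
    subst this
    simp [PySem.Chars.splitOn.go, fSplit]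
  | succ f ih =>
    cases l with
    | nil => simp [PySem.Chars.splitOn.go, fSplit]
    | cons c rest =>
      by_cases h : c = '.'
      · subst h
        have hp : List.isPrefixOf ['.'] ('.' :: rest) = true := by simp [List.isPrefixOf]
        simp only [PySem.Chars.splitOn.go, hp, if_true, List.length_singleton,
          List.drop_succ_cons, List.drop_zero]
        rw [ih rest [] (cur.reverse :: acc) (by simpa using Nat.le_of_succ_le_succ hf)]
        simp [fSplit]
      · have hp : List.isPrefixOf ['.'] (c :: rest) = false := by
          simp only [List.isPrefixOf, Bool.and_eq_false_iff, beq_eq_false_iff_ne, ne_eq]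
          exact Or.inl fun he => h he.symm
        simp only [PySem.Chars.splitOn.go, hp, if_false]
        rw [ih rest (c :: cur) acc (by simpa using Nat.le_of_succ_le_succ hf)]
        simp [fSplit, h]

theorem splitOn_eq_fSplit (cs : List Char) :
    PySem.Chars.splitOn cs ['.'] = fSplit cs [] := by
  unfold PySem.Chars.splitOn
  simpa using splitOn_go_eq cs (cs.length + 1) [] [] (by omega)

theorem loopB_fSplit (l cur : List Char) (pos : Int) :
    findEmptyLoopB (fSplit l cur).dropLast pos = gDots l (pos + cur.length + 1) := by
  induction l generalizing cur pos with
  | nil => simp [fSplit, gDots, findEmptyLoopB]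
  | cons c rest ih =>
    by_cases h : c = '.'
    · subst h
      rw [fSplit, if_pos rfl,
        List.dropLast_cons_of_ne_nil (fSplit_ne_nil rest [])]
      rw [findEmptyLoopB]
      have h2 := ih [] (pos + cur.length + 1)
      simp only [List.length_nil, Int.natCast_zero, add_zero] at h2
      simp [gDots, h2, List.length_reverse]
    · rw [fSplit, if_neg h, ih (c :: cur) pos]
      simp only [gDots, if_neg h, List.length_cons]
      congr 1
      push_cast
      ring

-- B equals the dot-index reference
theorem alt_eq_gDots (S : String) : find_empty_alt S = gDots S.toList 0 := by
  unfold find_empty_alt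
  rw [PySem.List.slice_to_neg_one, splitOn_eq_fSplit]
  have := loopB_fSplit S.toList [] (-1)
  simpa using this

theorem gDots_no_dot (l : List Char) (i : Int) (h : '.' ∉ l) : gDots l i = [] := by
  induction l generalizing i with
  | nil => rfl
  | cons c t ih =>
    simp only [List.mem_cons, not_or] at h
    simp [gDots, Ne.symm h.1, ih _ h.2]

theorem gDots_append (a b : List Char) (i : Int) :
    gDots (a ++ b) i = gDots a i ++ gDots b (i + a.length) := by
  induction a generalizing i with
  | nil => simp [gDots]
  | cons c t ih =>
    by_cases h : c = '.' <;> simp [gDots, h, ih, add_assoc] <;> ring_nf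

theorem singleton_prefix_drop (cs : List Char) (j : Nat) :
    ['.'] <+: cs.drop j ↔ cs[j]? = some '.' := by
  constructor
  · rintro ⟨t, ht⟩
    have : (cs.drop j).head? = some '.' := by rw [← ht]; rfl
    simpa [List.head?_drop] using this
  · intro h
    have hd : (cs.drop j).head? = some '.' := by simpa [List.head?_drop] using h
    obtain ⟨t, ht⟩ := List.head?_eq_some_iff.mp hd
    exact ⟨t, by rw [ht]; rfl⟩

theorem loopA_eq_gDots (cs : List Char) (fuel k : Nat)
    (hk : k ≤ cs.length) (hfuel : cs.length - k < fuel) :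
    findEmptyLoopA cs (k : Int) fuel = gDots (cs.drop k) k := by
  induction fuel generalizing k with
  | zero => omega
  | succ f ih =>
    simp only [findEmptyLoopA]
    by_cases hj : PySem.Chars.findFrom cs ['.'] (k : Int) = -1
    · rw [if_pos hj]
      have hnotin : ¬ ['.'] <:+: cs.drop k :=
        (PySem.Chars.findFrom_natCast_eq_neg_one_iff cs ['.'] k hk).mp hj
      have : '.' ∉ cs.drop k := fun hmem =>
        hnotin ((List.singleton_infix_iff '.' (cs.drop k)).mpr hmem)
      rw [gDots_no_dot _ _ this]
    · rw [if_neg hj]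
      obtain ⟨hge, hpre, hmin⟩ := PySem.Chars.findFrom_natCast_spec cs ['.'] k hk hj
      set j := PySem.Chars.findFrom cs ['.'] (k : Int) with hjdef
      have hj0 : 0 ≤ j := le_trans (by exact_mod_cast Int.natCast_nonneg k) hge
      have hget : cs[j.toNat]? = some '.' := (singleton_prefix_drop cs j.toNat).mp hpre
      have hjlt : j.toNat < cs.length := by
        by_contra h
        rw [List.getElem?_eq_none (by omega)] at hget
        simp at hget
      have hkj : k ≤ j.toNat := by omega
      have hdd : (cs.drop k).drop (j.toNat - k) = cs.drop j.toNat := by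
        rw [List.drop_drop]; congr 1; omega
      have hsplit : cs.drop k = (cs.drop k).take (j.toNat - k) ++ cs.drop j.toNat := by
        rw [← hdd, List.take_append_drop]
      have hnodot : '.' ∉ (cs.drop k).take (j.toNat - k) := by
        intro hmem
        obtain ⟨idx, hidxlt, hidx⟩ := List.getElem_of_mem hmem
        have hlt : k + idx < j.toNat := by
          have := List.length_take_le (j.toNat - k) (cs.drop k); omega
        have hval : cs[k + idx]? = some '.' := by
          rw [List.getElem_take] at hidx
          rw [List.getElem_drop] at hidx
          rw [List.getElem?_eq_getElem (by omega)]
          exact congrArg some hidx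
        exact hmin (k + idx) (by omega) hlt ((singleton_prefix_drop cs (k + idx)).mpr hval)
      have hlen : ((cs.drop k).take (j.toNat - k)).length = j.toNat - k := by
        simp; omega
      rw [hsplit, gDots_append, gDots_no_dot _ _ hnodot, List.nil_append, hlen]
      have harg : (k : Int) + ((j.toNat - k : Nat) : Int) = j := by omega
      rw [harg]
      have hdropj : cs.drop j.toNat = '.' :: cs.drop (j.toNat + 1) := by
        obtain ⟨h, hv⟩ := List.getElem?_eq_some_iff.mp hget
        rw [List.drop_eq_getElem_cons h, hv]
      rw [hdropj]
      simp only [gDots, reduceIte]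
      congr 1
      have hc : j + 1 = ((j.toNat + 1 : Nat) : Int) := by omega
      rw [hc, ih (j.toNat + 1) (by omega) (by omega)]

-- ===== VERDICT (by name: the statement is the Claim_ definition above) =====
theorem find_empty_spec : Claim_equal_find_empty := by
  intro S _
  unfold Spec_find_empty find_empty
  rw [alt_eq_gDots]
  have := loopA_eq_gDots S.toList (S.toList.length + 1) 0 (by omega) (by omega)
  simpa using this
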